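-- pv_equiv track=rewrite | github.com/adam-blakey/advent-of-code | day_6/main.py | countUniqueQuestions
-- ===== SOURCE A (Python) =====
-- from string import ascii_lowercase
--
-- def characterFrequency(input):
--     dictionary = {}
--     for char in input:
--         if char in dictionary:
--             dictionary[char] += 1
--         elif char != ' ':
--             dictionary[char] = 1
--
--     return dictionary
--
-- def uniqueDictionary(answers):
--     temp = {}
--     for char in ascii_lowercase:
--         good = True
--         for answer in answers[:-1]:
--             if char not in answer:
--                 good = False
--
--         if good:
--             temp[char] = 1
--     return temp
--
-- def countUniqueQuestions(questions):
--     count = 0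
--     for question in questions:
--         per_person = question.split(' ')
--         answers = []
--         for person in per_person:
--             answers.append(characterFrequency(person))
--
--         uniqueAnswers = uniqueDictionary(answers)
--         count += len(uniqueAnswers)
--
--     return count
-- ===== SOURCE B (Python) =====
-- from string import ascii_lowercase
--
-- def countUniqueQuestions(questions):
--     full = set(ascii_lowercase)
--     total = 0
--     for question in questions:
--         common = full
--         for person in question.split(' ')[:-1]:
--             common = common & set(person)
--         total += len(common)
--     return total
-- ===== Notes on version B (the rewrite author's own statement) =====
-- stated objective: faster
-- what changed: Replaces A's per-group scan of all 26 letters, each testing membership in per-person frequency dicts built beforehand, by a single fold of set intersections over the all-but-last persons starting from the full alphabet set; the dict-building pass and the 26-letter outer loop disappear.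
import Mathlib
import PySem

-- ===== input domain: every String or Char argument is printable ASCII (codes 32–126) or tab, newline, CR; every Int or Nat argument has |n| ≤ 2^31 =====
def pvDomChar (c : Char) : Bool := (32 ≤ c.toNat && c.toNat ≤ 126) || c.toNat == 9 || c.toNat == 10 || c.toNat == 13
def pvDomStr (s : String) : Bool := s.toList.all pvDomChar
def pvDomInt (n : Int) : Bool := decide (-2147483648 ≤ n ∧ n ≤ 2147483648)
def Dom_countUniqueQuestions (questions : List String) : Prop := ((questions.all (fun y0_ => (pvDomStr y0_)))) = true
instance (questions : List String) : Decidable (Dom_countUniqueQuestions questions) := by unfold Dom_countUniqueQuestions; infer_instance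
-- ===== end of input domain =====

-- B replaces A's per-group 26-letter × per-person membership scan by one fold of set
-- intersections over the all-but-last persons, starting from the full alphabet (simpler).

-- ===== PORT A =====
-- string.ascii_lowercase
def asciiLowercase : List Char := "abcdefghijklmnopqrstuvwxyz".toList

def characterFrequency (input : List Char) : PySem.Dict Char Int :=
  input.foldl (fun dictionary char =>
    if dictionary.contains char then
      dictionary.insert char (dictionary.getD char 0 + 1)
    else if char ≠ ' ' then
      dictionary.insert char 1
    else
      dictionary) PySem.Dict.empty

def uniqueDictionary (answers : List (PySem.Dict Char Int)) : PySem.Dict Char Int :=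
  asciiLowercase.foldl (fun temp char =>
    let good := (PySem.List.slice answers none (some (-1))).foldl
      (fun good answer => if ¬ answer.contains char then false else good) true
    if good then temp.insert char 1 else temp) PySem.Dict.empty

def countUniqueQuestions (questions : List String) : Int :=
  questions.foldl (fun count question =>
    let per_person := PySem.Chars.splitOn question.toList [' ']
    let answers := per_person.foldl (fun answers person => answers ++ [characterFrequency person]) []
    count + ((uniqueDictionary answers).size : Int)) 0

-- ===== PORT B =====
def countUniqueQuestions_alt (questions : List String) : Int :=
  questions.foldl (fun total question =>
    let common := (PySem.List.slice (PySem.Chars.splitOn question.toList [' ']) none (some (-1))).foldl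
      (fun common person => PySem.Set.inter common (PySem.Set.ofList person))
      (PySem.Set.ofList asciiLowercase)
    total + PySem.Set.len common) 0

-- ===== PRECONDITION & SPEC =====
def Spec_countUniqueQuestions (questions : List String) (out : Int) : Prop := out = countUniqueQuestions_alt questions
instance (questions : List String) (out : Int) : Decidable (Spec_countUniqueQuestions questions out) := by unfold Spec_countUniqueQuestions; infer_instance

-- ===== CLAIM (what is proved, stated in full; the proofs are below) =====
def Claim_equal_countUniqueQuestions : Prop := ∀ (questions : List String), Dom_countUniqueQuestions questions → Spec_countUniqueQuestions questions (countUniqueQuestions questions)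

-- ===== LEMMAS AND PROOFS =====

-- A's answer-building loop is List.map
theorem foldl_append_cf (l : List (List Char)) (acc : List (PySem.Dict Char Int)) :
    l.foldl (fun answers person => answers ++ [characterFrequency person]) acc
      = acc ++ l.map characterFrequency := by
  induction l generalizing acc with
  | nil => simp
  | cons p rest ih => simp [List.foldl_cons, ih]

-- A's inner 'good' loop is List.all
theorem goodFold (c : Char) (l : List (PySem.Dict Char Int)) (g : Bool) :
    l.foldl (fun good answer => if ¬ answer.contains c then false else good) g
      = (g && l.all (fun a => a.contains c)) := by
  induction l generalizing g with
  | nil => simp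
  | cons a rest ih =>
    simp only [List.foldl_cons, List.all_cons, ih]
    by_cases h : a.contains c = true <;> simp [h]

-- keys of characterFrequency = non-space characters of the person
theorem contains_cf_fold (cs : List Char) (d : PySem.Dict Char Int) (c : Char) :
    (cs.foldl (fun dictionary char =>
      if dictionary.contains char then
        dictionary.insert char (dictionary.getD char 0 + 1)
      else if char ≠ ' ' then
        dictionary.insert char 1
      else
        dictionary) d).contains c
      = (d.contains c || (cs.contains c && !(c == ' '))) := by
  induction cs generalizing d with
  | nil => simp
  | cons x rest ih =>
    simp only [List.foldl_cons]
    by_cases hx : d.contains x = true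
    · simp only [hx, if_pos]
      rw [ih]
      by_cases hcx : c = x
      · subst hcx; simp [hx]
      · have hbe : (c == x) = false := beq_eq_false_iff_ne.mpr hcx
        simp [PySem.Dict.contains_insert, hbe, hcx]
    · simp only [hx, if_neg, Bool.false_eq_true, not_false_iff]
      by_cases hsp : x = ' '
      · subst hsp
        simp only [ne_eq, not_true, if_neg, not_false_iff]
        rw [ih]
        by_cases hcx : c = ' '
        · subst hcx; simp
        · simp [hcx]
      · simp only [ne_eq, hsp, not_false_iff, if_pos]
        rw [ih]
        by_cases hcx : c = x
        · subst hcx; simp [hsp]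
        · have hbe : (c == x) = false := beq_eq_false_iff_ne.mpr hcx
          simp [PySem.Dict.contains_insert, hbe, hcx]

theorem contains_cf (p : List Char) (c : Char) :
    (characterFrequency p).contains c = (p.contains c && !(c == ' ')) := by
  rw [characterFrequency, contains_cf_fold]
  simp [PySem.Dict.empty]

-- size of the uniqueDictionary-style fold, for distinct fresh keys
theorem size_ud_fold (P : Char → Bool) (l : List Char) (temp : PySem.Dict Char Int)
    (hnd : l.Nodup) (hf : ∀ c ∈ l, temp.contains c = false) :
    (l.foldl (fun temp char => if P char then temp.insert char 1 else temp) temp).size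
      = temp.size + (l.filter P).length := by
  induction l generalizing temp with
  | nil => simp
  | cons x rest ih =>
    simp only [List.foldl_cons]
    have hx : temp.contains x = false := hf x (by simp)
    have hnd' : rest.Nodup := (List.nodup_cons.mp hnd).2
    have hxr : x ∉ rest := (List.nodup_cons.mp hnd).1
    by_cases hP : P x = true
    · rw [if_pos hP]
      rw [ih (temp.insert x 1) hnd' ?_]
      · rw [PySem.Dict.size_insert, hx]
        simp [hP]
        omega
      · intro c hc
        rw [PySem.Dict.contains_insert]
        have hne : c ≠ x := fun h => hxr (h ▸ hc)
        simp [beq_eq_false_iff_ne.mpr hne, hf c (by simp [hc])]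
    · rw [if_neg (by simp [hP])]
      rw [ih temp hnd' (fun c hc => hf c (by simp [hc]))]
      simp [hP]

theorem contains_ofList (p : List Char) (c : Char) :
    (PySem.Set.ofList p).contains c = p.contains c := by
  rw [Bool.eq_iff_iff]
  simp [PySem.Set.mem_ofList]

theorem all_congr' {α : Type} (l : List α) (p q : α → Bool)
    (h : ∀ a ∈ l, p a = q a) : l.all p = l.all q := by
  induction l with
  | nil => rfl
  | cons x xs ih =>
    simp only [List.all_cons, h x (by simp), ih (fun a ha => h a (by simp [ha]))]

-- B's intersection fold is a filter of the start set
theorem interFold (l : List (List Char)) (s : PySem.Set Char) :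
    l.foldl (fun common person => PySem.Set.inter common (PySem.Set.ofList person)) s
      = s.filter (fun c => l.all (fun p => p.contains c)) := by
  induction l generalizing s with
  | nil => simp
  | cons p rest ih =>
    simp only [List.foldl_cons, ih]
    have hinter : PySem.Set.inter s (PySem.Set.ofList p)
        = s.filter (fun c => p.contains c) := by
      rw [PySem.Set.inter]
      exact List.filter_congr (fun c _ => contains_ofList p c)
    rw [hinter, List.filter_filter]
    exact List.filter_congr (fun c _ => by simp [Bool.and_comm])

set_option maxRecDepth 8192 in
theorem asciiLowercase_nodup : asciiLowercase.Nodup := by decide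

theorem asciiLowercase_no_space : ∀ c ∈ asciiLowercase, (c == ' ') = false := by
  have hns : ' ' ∉ asciiLowercase := by decide
  intro c hc
  exact beq_eq_false_iff_ne.mpr (fun h => hns (h ▸ hc))

-- the two per-letter predicates agree on lowercase letters
theorem pred_eq (ps : List (List Char)) (c : Char) (hc : c ∈ asciiLowercase) :
    (PySem.List.slice (ps.map characterFrequency) none (some (-1))).foldl
        (fun good answer => if ¬ answer.contains c then false else good) true
      = (PySem.List.slice ps none (some (-1))).all (fun p => (PySem.Set.ofList p).contains c) := by
  rw [goodFold, PySem.List.slice_to_neg_one, PySem.List.slice_to_neg_one, Bool.true_and,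
      ← List.map_dropLast, List.all_map]
  refine all_congr' _ _ _ (fun p _ => ?_)
  simp [Function.comp, contains_cf, asciiLowercase_no_space c hc]

-- per-question equality
theorem per_question (q : String) :
    ((uniqueDictionary ((PySem.Chars.splitOn q.toList [' ']).foldl
        (fun answers person => answers ++ [characterFrequency person]) [])).size : Int)
      = PySem.Set.len ((PySem.List.slice (PySem.Chars.splitOn q.toList [' ']) none (some (-1))).foldl
          (fun common person => PySem.Set.inter common (PySem.Set.ofList person))
          (PySem.Set.ofList asciiLowercase)) := by
  rw [foldl_append_cf, List.nil_append, uniqueDictionary,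
      size_ud_fold _ _ _ asciiLowercase_nodup (by intro c _; simp [PySem.Dict.empty]),
      interFold, PySem.Set.ofList_eq_self_of_nodup _ asciiLowercase_nodup]
  rw [List.filter_congr (fun c hc => pred_eq (PySem.Chars.splitOn q.toList [' ']) c hc)]
  rw [List.filter_congr (q := fun c => (PySem.List.slice (PySem.Chars.splitOn q.toList [' ']) none (some (-1))).all
        (fun p => (PySem.Set.ofList p).contains c))
      (fun c _ => rfl)]
  simp [PySem.Set.len, PySem.Dict.size, PySem.Dict.empty]

theorem main_eq (questions : List String) :
    countUniqueQuestions questions = countUniqueQuestions_alt questions := by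
  unfold countUniqueQuestions countUniqueQuestions_alt
  induction questions using List.reverseRecOn with
  | nil => rfl
  | append_singleton qs q ih =>
    rw [List.foldl_append, List.foldl_append, ih]
    simp only [List.foldl_cons, List.foldl_nil]
    exact congrArg _ (per_question q)

-- ===== VERDICT (by name: the statement is the Claim_ definition above) =====
theorem countUniqueQuestions_spec : Claim_equal_countUniqueQuestions := by
  intro questions _
  exact main_eq questions
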